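-- pv_equiv track=rewrite | github.com/MatanelP/Nanograms-Solver | nonogram.py | get_intersection_row
-- ===== SOURCE A (Python) =====
-- WHITE = 0
--
-- BLACK = 1
--
-- def get_intersection_row(rows):
--     """
--     This function gets the intersection row of a given lists so that if all the
--     values in the same cell's index in the given lists are the same, the
--     intersection will also have that value in that cell's index.
--     In case there are a value of -1 in one list's cell and 1 in another list,
--     the intersection row will get -1 in the same index. see "Notes" above for
--     more info.
--     :param rows: a 2 dimensional list, the rows to intersect together.
--     :return: a list, the intersection_row
--     """
--     intersection_row = [-1] * len(rows[0]) if len(rows) != 0 else []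
--     for i in range(len(intersection_row)):
--         all_black = True
--         all_white = True
--         for row in rows:
--             if row[i] != BLACK:
--                 all_black = False
--             if row[i] != WHITE:
--                 all_white = False
--         if all_black:
--             intersection_row[i] = BLACK
--         if all_white:
--             intersection_row[i] = WHITE
--     return intersection_row
-- ===== SOURCE B (Python) =====
-- WHITE = 0
--
-- BLACK = 1
--
-- def get_intersection_row(rows):
--     # One pass over the rows (row-major): start from the first row normalized
--     # to {0, 1, -1}, then merge each further row cell-wise (equal keeps, differing -> -1).
--     if len(rows) == 0:
--         return []
--     acc = [v if v in (WHITE, BLACK) else -1 for v in rows[0]]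
--     for row in rows[1:]:
--         acc = [a if a == row[i] else -1 for i, a in enumerate(acc)]
--     return acc
-- ===== Notes on version B (the rewrite author's own statement) =====
-- stated objective: alternative
-- what changed: Replaces the column-major double scan (per column, two boolean flags over all rows) by a single row-major pass that starts from the first row normalized to {0,1,-1} and merges each further row cell-wise (equal keeps the value, any difference yields -1).
import Mathlib
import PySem

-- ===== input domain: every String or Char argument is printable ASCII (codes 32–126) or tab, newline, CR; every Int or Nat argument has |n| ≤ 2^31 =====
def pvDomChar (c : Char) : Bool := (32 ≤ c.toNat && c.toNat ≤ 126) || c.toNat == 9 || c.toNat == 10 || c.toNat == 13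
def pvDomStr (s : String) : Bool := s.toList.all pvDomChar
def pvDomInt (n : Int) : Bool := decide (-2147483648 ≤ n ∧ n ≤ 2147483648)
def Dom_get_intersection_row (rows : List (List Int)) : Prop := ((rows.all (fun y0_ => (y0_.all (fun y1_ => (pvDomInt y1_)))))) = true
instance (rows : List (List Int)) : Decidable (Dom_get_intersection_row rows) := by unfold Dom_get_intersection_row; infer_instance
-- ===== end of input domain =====

-- B replaces A's column-major two-flag scan by a row-major cell-wise merge pass (same cost, different traversal).


-- ===== PORT A =====
-- inner 'for row in rows' loop body: the two boolean flags
def pvFlagStepA (i : Int) (fl : Bool × Bool) (row : List Int) : Bool × Bool :=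
  ((if PySem.List.pyGetD row i 0 ≠ 1 then false else fl.1),
   (if PySem.List.pyGetD row i 0 ≠ 0 then false else fl.2))

-- outer loop body: compute the flags, then the two conditional assignments
def pvStepA (rows : List (List Int)) (ir : List Int) (i : Int) : List Int :=
  let fl := rows.foldl (pvFlagStepA i) (true, true)
  let ir := if fl.1 then PySem.List.pySetD ir i 1 else ir
  if fl.2 then PySem.List.pySetD ir i 0 else ir

def get_intersection_row (rows : List (List Int)) : List Int :=
  let ir : List Int :=
    if rows.length ≠ 0 then List.replicate (rows.headD []).length (-1) else []
  (PySem.List.pyRange 0 (ir.length : Int) 1).foldl (pvStepA rows) ir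

-- ===== PORT B =====
-- 'acc = [a if a == row[i] else -1 for i, a in enumerate(acc)]'
def pvMergeB (acc : List Int) (row : List Int) : List Int :=
  (PySem.List.enumerate acc).map
    (fun p => if p.2 = PySem.List.pyGetD row p.1 0 then p.2 else -1)

def get_intersection_row_alt (rows : List (List Int)) : List Int :=
  if rows.length = 0 then []
  else
    let acc := (rows.headD []).map (fun v => if v = 0 ∨ v = 1 then v else -1)
    rows.tail.foldl pvMergeB acc

-- ===== PRECONDITION & SPEC =====
-- Pre_ excludes exactly the ragged grids on which Python A raises IndexError
-- (some row shorter than the first row); B raises there as well.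
def Pre_get_intersection_row (rows : List (List Int)) : Prop :=
  ∀ r ∈ rows, (rows.headD []).length ≤ r.length
instance (rows : List (List Int)) : Decidable (Pre_get_intersection_row rows) := by
  unfold Pre_get_intersection_row; infer_instance

def pvWitness_get_intersection_row : List (List Int) := [[1, 0, 1], [1, 2, 1]]

def Spec_get_intersection_row (rows : List (List Int)) (out : List Int) : Prop := out = get_intersection_row_alt rows
instance (rows : List (List Int)) (out : List Int) : Decidable (Spec_get_intersection_row rows out) := by unfold Spec_get_intersection_row; infer_instance

-- ===== CLAIM (what is proved, stated in full; the proofs are below) =====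
def Claim_equal_get_intersection_row : Prop := ∀ (rows : List (List Int)), Dom_get_intersection_row rows → Pre_get_intersection_row rows → Spec_get_intersection_row rows (get_intersection_row rows)

-- ===== LEMMAS AND PROOFS =====

-- all-black / all-white flags for column i, as predicates over the rows
def pvAbF (rows : List (List Int)) (i : Int) : Bool :=
  rows.all (fun r => PySem.List.pyGetD r i 0 == 1)
def pvAwF (rows : List (List Int)) (i : Int) : Bool :=
  rows.all (fun r => PySem.List.pyGetD r i 0 == 0)

theorem pvFlags_eq (rows : List (List Int)) (i : Int) (b1 b2 : Bool) :
    rows.foldl (pvFlagStepA i) (b1, b2) = (b1 && pvAbF rows i, b2 && pvAwF rows i) := by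
  induction rows generalizing b1 b2 with
  | nil => simp [pvAbF, pvAwF]
  | cons r rs ih =>
      simp only [List.foldl_cons, pvFlagStepA, ih, pvAbF, pvAwF, List.all_cons]
      by_cases h1 : PySem.List.pyGetD r i 0 = 1 <;>
        by_cases h0 : PySem.List.pyGetD r i 0 = 0 <;>
          simp [h1, h0]

theorem pvStepA_length (rows : List (List Int)) (ir : List Int) (i : Int) :
    (pvStepA rows ir i).length = ir.length := by
  simp only [pvStepA]
  split <;> split <;> simp [PySem.List.length_pySetD]

theorem pvStepA_getD (rows : List (List Int)) (ir : List Int) (k j : Nat) :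
    (pvStepA rows ir (k : Int)).getD j 0
      = if j = k ∧ k < ir.length then
          (if pvAwF rows (k : Int) then 0 else if pvAbF rows (k : Int) then 1 else ir.getD j 0)
        else ir.getD j 0 := by
  simp only [pvStepA]
  rw [pvFlags_eq]
  simp only [Bool.true_and, PySem.List.pySetD_natCast]
  by_cases hab : pvAbF rows (k : Int) <;> by_cases haw : pvAwF rows (k : Int) <;>
    simp only [hab, haw, if_true, Bool.false_eq_true, if_false] <;>
    by_cases hc : j = k ∧ k < ir.length <;>
      simp [List.length_set, hc] <;>
  · rw [List.getElem?_set]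
    by_cases hkj : k = j
    · subst hkj
      have hnl : ¬ k < ir.length := fun h => hc ⟨rfl, h⟩
      simp [hnl]
    · simp [hkj]

-- a list is the range-map of its own getD
theorem pv_map_getD_range (l : List Int) :
    (List.range l.length).map (fun j => l.getD j 0) = l := by
  apply List.ext_getElem
  · simp
  · intro i h1 h2
    simp only [List.getElem_map, List.getElem_range]
    rw [List.getD_eq_getElem l 0 h2]

theorem pv_map_eq_map_range (l : List Int) (f : Int → Int) :
    l.map f = (List.range l.length).map (fun j => f (l.getD j 0)) := by
  apply List.ext_getElem
  · simp
  · intro i h1 h2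
    have h3 : i < l.length := by simpa using h1
    simp only [List.getElem_map, List.getElem_range]
    rw [List.getD_eq_getElem l 0 h3]

-- A's outer loop: folding pvStepA over range(k, n) rewrites every cell with index >= k
theorem pvFoldA (rows : List (List Int)) (n : Nat) :
    ∀ (fuel k : Nat) (ir : List Int), ir.length = n → n - k = fuel →
    (PySem.List.pyRange (k : Int) (n : Int) 1).foldl (pvStepA rows) ir
      = (List.range n).map (fun (j : Nat) =>
          if j < k then ir.getD j 0
          else if pvAwF rows (j : Int) then 0
          else if pvAbF rows (j : Int) then 1
          else ir.getD j 0) := by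
  intro fuel
  induction fuel with
  | zero =>
      intro k ir hlen hfuel
      have hnk : n ≤ k := by omega
      rw [PySem.List.pyRange_one_eq_nil (by exact_mod_cast hnk)]
      simp only [List.foldl_nil]
      have hcg : ∀ j ∈ List.range n,
          (if j < k then ir.getD j 0
           else if pvAwF rows (j : Int) then 0
           else if pvAbF rows (j : Int) then 1
           else ir.getD j 0) = ir.getD j 0 := by
        intro j hj
        rw [List.mem_range] at hj
        simp [show j < k by omega]
      rw [List.map_congr_left hcg, ← hlen, pv_map_getD_range]
  | succ m ih =>
      intro k ir hlen hfuel
      have hkn : k < n := by omega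
      rw [PySem.List.pyRange_one_cons (by exact_mod_cast hkn)]
      simp only [List.foldl_cons]
      have hcast : ((k : Int) + 1) = ((k + 1 : Nat) : Int) := by push_cast; ring
      rw [hcast, ih (k + 1) (pvStepA rows ir (k : Int))
            (by rw [pvStepA_length]; exact hlen) (by omega)]
      apply List.map_congr_left
      intro j hj
      rw [List.mem_range] at hj
      rw [pvStepA_getD]
      by_cases hjk : j = k
      · subst hjk
        have hc : j = j ∧ j < ir.length := ⟨rfl, by omega⟩
        simp [hc.right]
      · have hc : ¬ (j = k ∧ k < ir.length) := fun h => hjk h.left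
        simp only [if_neg hc]
        by_cases hlt : j < k
        · simp only [if_pos hlt, if_pos (show j < k + 1 by omega)]
        · simp only [if_neg hlt, if_neg (show ¬ j < k + 1 by omega)]

-- characterization of A under a nonempty list of rows
theorem pvA_char (r0 : List Int) (rest : List (List Int)) :
    get_intersection_row (r0 :: rest)
      = (List.range r0.length).map (fun (j : Nat) =>
          if pvAwF (r0 :: rest) (j : Int) then 0
          else if pvAbF (r0 :: rest) (j : Int) then 1
          else -1) := by
  simp only [get_intersection_row, List.length_cons, List.headD_cons, ne_eq,
             Nat.succ_ne_zero, not_false_iff, if_true, List.length_replicate]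
  rw [show (0 : Int) = ((0 : Nat) : Int) by simp,
      pvFoldA (r0 :: rest) r0.length r0.length 0 _ (by simp) (by omega)]
  apply List.map_congr_left
  intro j hj
  rw [List.mem_range] at hj
  simp [List.getD_eq_getElem?_getD, hj]

-- one merge step over a range-map column representation
theorem pvMergeB_map_range (n : Nat) (f : Nat → Int) (row : List Int) :
    pvMergeB ((List.range n).map f) row
      = (List.range n).map (fun (j : Nat) =>
          if f j = PySem.List.pyGetD row (j : Int) 0 then f j else -1) := by
  unfold pvMergeB
  rw [PySem.List.enumerate_eq_map_pyRange _ (0 : Int)]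
  simp only [PySem.List.len_eq, List.length_map, List.length_range]
  rw [PySem.List.pyRange_zero_nat]
  simp only [List.map_map]
  apply List.map_congr_left
  intro j hj
  rw [List.mem_range] at hj
  simp only [Function.comp_apply]
  rw [PySem.List.pyGetD_natCast ((List.range n).map f) j 0,
      PySem.List.getD_map_range f n j 0 hj]

-- B's outer loop: folding merges over rows, column-wise
theorem pvFoldB (n : Nat) (rs : List (List Int)) :
    ∀ f : Nat → Int,
    rs.foldl pvMergeB ((List.range n).map f)
      = (List.range n).map (fun (j : Nat) =>
          rs.foldl (fun a r => if a = PySem.List.pyGetD r (j : Int) 0 then a else -1) (f j)) := by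
  induction rs with
  | nil => intro f; simp
  | cons r rs ih =>
      intro f
      simp only [List.foldl_cons]
      rw [pvMergeB_map_range, ih]

-- characterization of B under a nonempty list of rows
theorem pvB_char (r0 : List Int) (rest : List (List Int)) :
    get_intersection_row_alt (r0 :: rest)
      = (List.range r0.length).map (fun (j : Nat) =>
          rest.foldl (fun a r => if a = PySem.List.pyGetD r (j : Int) 0 then a else -1)
            (if r0.getD j 0 = 0 ∨ r0.getD j 0 = 1 then r0.getD j 0 else -1)) := by
  simp only [get_intersection_row_alt, List.length_cons, List.headD_cons, List.tail_cons]
  rw [if_neg (by omega : ¬ (rest.length + 1 = 0))]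
  rw [pv_map_eq_map_range r0 (fun v => if v = 0 ∨ v = 1 then v else -1), pvFoldB]

-- the cell-wise merge fold in closed form
theorem pvFoldMerge (vs : List Int) :
    ∀ a : Int, vs.foldl (fun a v => if a = v then a else -1) a
      = if vs.all (· == a) then a else -1 := by
  induction vs with
  | nil => intro a; simp
  | cons v vs ih =>
      intro a
      simp only [List.foldl_cons, List.all_cons]
      by_cases h : a = v
      · subst h; simp [ih]
      · rw [if_neg h, ih (-1)]
        have hv : (v == a) = false := by simp [Ne.symm h]
        simp [hv]

-- ===== VERDICT (by name: the statement is the Claim_ definition above) =====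
theorem get_intersection_row_spec : Claim_equal_get_intersection_row := by
  intro rows _ _
  unfold Spec_get_intersection_row
  cases rows with
  | nil => rfl
  | cons r0 rest =>
      rw [pvA_char, pvB_char]
      apply List.map_congr_left
      intro j hj
      rw [List.mem_range] at hj
      rw [← List.foldl_map (f := fun r => PySem.List.pyGetD r (j : Int) 0)
            (g := fun a v => if a = v then a else -1),
          pvFoldMerge, List.all_map]
      simp only [pvAwF, pvAbF, List.all_cons, PySem.List.pyGetD_natCast]
      set v0 := r0.getD j 0 with hv0
      by_cases h0 : v0 = 0
      · simp [h0]
      · by_cases h1 : v0 = 1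
        · simp [h1]
        · have hn : ¬ (v0 = 0 ∨ v0 = 1) := by tauto
          rw [if_neg hn]
          have hb0 : (v0 == 0) = false := by simp [h0]
          have hb1 : (v0 == 1) = false := by simp [h1]
          simp only [hb0, hb1, Bool.false_and, Bool.false_eq_true, if_false]
          split <;> rfl
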